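-- pv_equiv track=rewrite | github.com/nigalanakis/Crystal_Math | source_code/maths.py | generate_proposed_eigenvectors
-- ===== SOURCE A (Python) =====
-- import itertools
--
-- def generate_proposed_eigenvectors(n_max):
--     """
--     Generate a list of 3D vectors with specific criteria.
--
--     Parameters
--     ----------
--     n_max : int
--         The maximum absolute value for the vector components.
--
--     Returns
--     -------
--     A list of valid 3D vectors as tuples.
--     """
--
--     # Initialize a list to hold the valid vectors
--     proposed_eigenvectors = []
--
--     # Create all combinations of vector components within the range [-n_max, n_max] for a 3D vector
--     # Note: we adjust the range for the first component to [0, n_max] to satisfy your second condition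
--     alternating_range = [0] + [val for i in range(1, n_max + 1) for val in (i, -i)]
--     for combination in itertools.product(range(0,n_max+1), alternating_range, alternating_range):
--         # Unpack the combination into the individual components
--         x, y, z = combination
--
--         # Check if one and only one of the components is zero (condition 3)
--         if [x, y, z].count(0) >= 1 and [x, y, z].count(0) <= 2:
--             # Create a vector from the components
--             vector = (x, y, z)
--
--             # Check for parallel vectors
--             # A new vector is parallel to an existing vector if their cross product is the zero vector
--             is_parallel = False
--             for valid_vector in proposed_eigenvectors:
--                 cross_product = (valid_vector[1]*vector[2] - valid_vector[2]*vector[1],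
--                                  valid_vector[2]*vector[0] - valid_vector[0]*vector[2],
--                                  valid_vector[0]*vector[1] - valid_vector[1]*vector[0])
--
--                 if cross_product == (0, 0, 0):
--                     is_parallel = True
--                     break  # No need to check further, move to the next combination
--
--             # If the vector is not parallel to any vector in the list, we add it to our valid vectors
--             if not is_parallel:
--                 proposed_eigenvectors.append(vector)
--     return proposed_eigenvectors
-- ===== SOURCE B (Python) =====
-- def generate_proposed_eigenvectors(n_max):
--     def gcd(a, b):
--         while b:
--             a, b = b, a % b
--         return a
--
--     alternating_range = [0] + [val for i in range(1, n_max + 1) for val in (i, -i)]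
--     seen = set()
--     result = []
--     for x in range(0, n_max + 1):
--         for y in alternating_range:
--             for z in alternating_range:
--                 zeros = (x == 0) + (y == 0) + (z == 0)
--                 if zeros == 0 or zeros == 3:
--                     continue
--                 g = gcd(gcd(abs(x), abs(y)), abs(z))
--                 p, q, r = x // g, y // g, z // g
--                 if p < 0 or (p == 0 and (q < 0 or (q == 0 and r < 0))):
--                     p, q, r = -p, -q, -r
--                 if (p, q, r) not in seen:
--                     seen.add((p, q, r))
--                     result.append((x, y, z))
--     return result
-- ===== Notes on version B (the rewrite author's own statement) =====
-- stated objective: faster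
-- what changed: B replaces A's inner scan over all previously kept vectors (cross-product test against each) by an O(1) membership test in a hash set of gcd-reduced, sign-normalized canonical direction keys, keeping the first occurrence of each direction.
import Mathlib
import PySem

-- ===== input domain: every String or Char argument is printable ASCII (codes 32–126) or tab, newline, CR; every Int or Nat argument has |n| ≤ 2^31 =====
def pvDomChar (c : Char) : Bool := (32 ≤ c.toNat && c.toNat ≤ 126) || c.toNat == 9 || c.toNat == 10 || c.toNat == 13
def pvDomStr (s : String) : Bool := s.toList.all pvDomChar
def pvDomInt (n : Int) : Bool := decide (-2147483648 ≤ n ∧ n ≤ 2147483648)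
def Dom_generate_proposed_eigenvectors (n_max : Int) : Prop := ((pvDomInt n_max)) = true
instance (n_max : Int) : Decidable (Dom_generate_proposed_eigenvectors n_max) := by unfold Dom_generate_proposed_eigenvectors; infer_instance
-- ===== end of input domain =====

-- B replaces A's quadratic "scan all kept vectors for a zero cross product" dedup by a
-- gcd+sign canonical key per direction kept in a set (objective: faster, asymptotic).


-- ===== PORT A =====
-- alternating_range = [0] + [val for i in range(1, n_max + 1) for val in (i, -i)]
def pvAltRange (n_max : Int) : List Int :=
  [0] ++ (PySem.List.pyRange 1 (n_max + 1) 1).flatMap (fun i => [i, -i])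

-- the cross product of A, compared with (0, 0, 0)
def pvCrossZero (w v : List Int) : Bool :=
  match w, v with
  | [a, b, c], [x, y, z] =>
      (b * z - c * y == 0) && (c * x - a * z == 0) && (a * y - b * x == 0)
  | _, _ => false

def generate_proposed_eigenvectors (n_max : Int) : List (List Int) :=
  let alt := pvAltRange n_max
  (PySem.List.pyRange 0 (n_max + 1) 1).foldl (fun acc x =>
    alt.foldl (fun acc y =>
      alt.foldl (fun acc z =>
        if 1 ≤ PySem.List.count [x, y, z] (0 : Int) ∧ PySem.List.count [x, y, z] (0 : Int) ≤ 2 then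
          if acc.any (fun w => pvCrossZero w [x, y, z]) then acc
          else acc ++ [[x, y, z]]
        else acc) acc) acc) []

-- ===== PORT B =====
-- hand-written Euclid of Source B: while b: a, b = b, a % b   (Python %)
def pvGcd (a b : Int) : Int :=
  if _h : b = 0 then a else pvGcd b (PySem.Int.mod a b)
termination_by b.natAbs
decreasing_by
  rcases lt_trichotomy b 0 with hb | hb | hb
  · have h1 := PySem.Int.mod_neg_bounds a hb
    omega
  · exact absurd hb _h
  · have h1 := PySem.Int.mod_nonneg a hb
    have h2 := PySem.Int.mod_lt a hb
    omega

-- key = (x // g, y // g, z // g), sign-normalized so the first nonzero entry is positive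
def pvCanon (x y z : Int) : Int × Int × Int :=
  let g := pvGcd (pvGcd |x| |y|) |z|
  let p := PySem.Int.floordiv x g
  let q := PySem.Int.floordiv y g
  let r := PySem.Int.floordiv z g
  if p < 0 ∨ (p = 0 ∧ (q < 0 ∨ (q = 0 ∧ r < 0))) then (-p, -q, -r) else (p, q, r)

def generate_proposed_eigenvectors_alt (n_max : Int) : List (List Int) :=
  let alt := pvAltRange n_max
  ((PySem.List.pyRange 0 (n_max + 1) 1).foldl (fun st x =>
    alt.foldl (fun st y =>
      alt.foldl (fun st z =>
        let zeros : Int := (if x == 0 then 1 else 0) + (if y == 0 then 1 else 0)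
          + (if z == 0 then 1 else 0)
        if zeros == 0 || zeros == 3 then st
        else
          let k := pvCanon x y z
          if k ∈ st.1 then st
          else (PySem.Set.add st.1 k, st.2 ++ [[x, y, z]])) st) st)
    ((PySem.Set.empty : PySem.Set (Int × Int × Int)), ([] : List (List Int)))).2

-- ===== PRECONDITION & SPEC =====
def Spec_generate_proposed_eigenvectors (n_max : Int) (out : List (List Int)) : Prop := out = generate_proposed_eigenvectors_alt n_max
instance (n_max : Int) (out : List (List Int)) : Decidable (Spec_generate_proposed_eigenvectors n_max out) := by unfold Spec_generate_proposed_eigenvectors; infer_instance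

-- ===== CLAIM (what is proved, stated in full; the proofs are below) =====
def Claim_equal_generate_proposed_eigenvectors : Prop := ∀ (n_max : Int), Dom_generate_proposed_eigenvectors n_max → Spec_generate_proposed_eigenvectors n_max (generate_proposed_eigenvectors n_max)

-- ===== LEMMAS AND PROOFS =====

-- abbreviations used by the proofs only
def pvToL (t : Int × Int × Int) : List Int := [t.1, t.2.1, t.2.2]
def pvCanonT (t : Int × Int × Int) : Int × Int × Int := pvCanon t.1 t.2.1 t.2.2
-- candidate passes the zero-count filter: not all zero, at least one zero
abbrev pvOk (t : Int × Int × Int) : Prop :=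
  ¬(t.1 = 0 ∧ t.2.1 = 0 ∧ t.2.2 = 0) ∧ (t.1 = 0 ∨ t.2.1 = 0 ∨ t.2.2 = 0)


-- sign-normalization of a triple, as performed on the key inside pvCanon
def pvFlip (u : Int × Int × Int) : Int × Int × Int :=
  if u.1 < 0 ∨ (u.1 = 0 ∧ (u.2.1 < 0 ∨ (u.2.1 = 0 ∧ u.2.2 < 0))) then
    (-u.1, -u.2.1, -u.2.2)
  else u

-- (1) pvGcd agrees with Nat.gcd on cast naturals
theorem pvGcd_natCast (k : Nat) : ∀ (m : Nat), pvGcd (m : Int) (k : Int) = (Nat.gcd k m : Int) := by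
  induction k using Nat.strong_induction_on with
  | _ k ih =>
    intro m
    rw [pvGcd]
    by_cases hk : k = 0
    · subst hk; simp
    · have hkz : (k : Int) ≠ 0 := by exact_mod_cast hk
      rw [dif_neg hkz, PySem.Int.mod_natCast,
        ih (m % k) (Nat.mod_lt _ (Nat.pos_of_ne_zero hk)) k, Nat.gcd_rec k m]

theorem pvGcd3_eq (x y z : Int) :
    pvGcd (pvGcd |x| |y|) |z| = (Nat.gcd (Nat.gcd x.natAbs y.natAbs) z.natAbs : Int) := by
  rw [Int.abs_eq_natAbs, Int.abs_eq_natAbs, Int.abs_eq_natAbs,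
    pvGcd_natCast y.natAbs x.natAbs, pvGcd_natCast z.natAbs (Nat.gcd y.natAbs x.natAbs),
    Nat.gcd_comm y.natAbs x.natAbs, Nat.gcd_comm z.natAbs]

-- (2) structure of pvCanon: exact division by a positive gcd, a primitive quotient, then pvFlip
theorem pvCanon_spec (x y z : Int) (h : ¬(x = 0 ∧ y = 0 ∧ z = 0)) :
    ∃ (g p q r : Int), 0 < g ∧ x = g * p ∧ y = g * q ∧ z = g * r ∧
      Nat.gcd (Nat.gcd p.natAbs q.natAbs) r.natAbs = 1 ∧
      pvCanon x y z = pvFlip (p, q, r) := by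
  set n1 := x.natAbs with hn1
  set n2 := y.natAbs with hn2
  set n3 := z.natAbs with hn3
  set G := Nat.gcd (Nat.gcd n1 n2) n3 with hGdef
  have hG : G ≠ 0 := by
    simp only [hGdef, Ne, Nat.gcd_eq_zero_iff, hn1, hn2, hn3, Int.natAbs_eq_zero]
    tauto
  have hGpos : (0 : Int) < (G : Int) := by exact_mod_cast Nat.pos_of_ne_zero hG
  have hd1 : G ∣ n1 := dvd_trans (Nat.gcd_dvd_left _ _) (Nat.gcd_dvd_left _ _)
  have hd2 : G ∣ n2 := dvd_trans (Nat.gcd_dvd_left _ _) (Nat.gcd_dvd_right _ _)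
  have hd3 : G ∣ n3 := Nat.gcd_dvd_right _ _
  have hx : (G : Int) ∣ x := Int.ofNat_dvd_left.mpr hd1
  have hy : (G : Int) ∣ y := Int.ofNat_dvd_left.mpr hd2
  have hz : (G : Int) ∣ z := Int.ofNat_dvd_left.mpr hd3
  refine ⟨(G : Int), x / (G : Int), y / (G : Int), z / (G : Int), hGpos,
    (Int.mul_ediv_cancel' hx).symm, (Int.mul_ediv_cancel' hy).symm,
    (Int.mul_ediv_cancel' hz).symm, ?_, ?_⟩
  · have e1 : n1 = G * (x / (G : Int)).natAbs := by
      conv_lhs => rw [hn1, ← Int.mul_ediv_cancel' hx]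
      rw [Int.natAbs_mul, Int.natAbs_natCast]
    have e2 : n2 = G * (y / (G : Int)).natAbs := by
      conv_lhs => rw [hn2, ← Int.mul_ediv_cancel' hy]
      rw [Int.natAbs_mul, Int.natAbs_natCast]
    have e3 : n3 = G * (z / (G : Int)).natAbs := by
      conv_lhs => rw [hn3, ← Int.mul_ediv_cancel' hz]
      rw [Int.natAbs_mul, Int.natAbs_natCast]
    have hmul : G * (Nat.gcd (Nat.gcd (x / (G : Int)).natAbs (y / (G : Int)).natAbs)
        (z / (G : Int)).natAbs) = G * 1 := by
      rw [mul_one, hGdef]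
      conv_rhs => rw [e1, e2, e3]
      rw [Nat.gcd_mul_left, Nat.gcd_mul_left]
    exact Nat.eq_of_mul_eq_mul_left (Nat.pos_of_ne_zero hG) hmul
  · show pvCanon x y z = pvFlip (x / (G : Int), y / (G : Int), z / (G : Int))
    unfold pvCanon pvFlip
    rw [pvGcd3_eq]
    have hfold : ((Nat.gcd (Nat.gcd x.natAbs y.natAbs) z.natAbs : Nat) : Int) = (G : Int) := by
      rw [hGdef]
    rw [hfold]
    simp only [PySem.Int.floordiv_eq_ediv_of_pos hGpos]

theorem pvFlip_sign (u : Int × Int × Int) :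
    ∃ ε : Int, (ε = 1 ∨ ε = -1) ∧ pvFlip u = (ε * u.1, ε * u.2.1, ε * u.2.2) := by
  unfold pvFlip
  split_ifs with h
  · exact ⟨-1, Or.inr rfl, by simp⟩
  · exact ⟨1, Or.inl rfl, by simp⟩

theorem pvFlip_neg (u : Int × Int × Int) (h : ¬(u.1 = 0 ∧ u.2.1 = 0 ∧ u.2.2 = 0)) :
    pvFlip (-u.1, -u.2.1, -u.2.2) = pvFlip u := by
  obtain ⟨p, q, r⟩ := u
  simp only [pvFlip] at *
  split_ifs with h1 h2 h2 <;>
    first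
      | rfl
      | (exfalso; omega)
      | simp

-- d divides each component scaled by w; a primitive (p,q,r) forces |d| ∣ |w|
theorem pv_dvd_abs (p q r d w : Int)
    (hprim : Nat.gcd (Nat.gcd p.natAbs q.natAbs) r.natAbs = 1)
    (h1 : d ∣ p * w) (h2 : d ∣ q * w) (h3 : d ∣ r * w) : d.natAbs ∣ w.natAbs := by
  have d1 : d.natAbs ∣ p.natAbs * w.natAbs := by
    rw [← Int.natAbs_mul]; exact Int.natAbs_dvd_natAbs.mpr h1
  have d2 : d.natAbs ∣ q.natAbs * w.natAbs := by
    rw [← Int.natAbs_mul]; exact Int.natAbs_dvd_natAbs.mpr h2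
  have d3 : d.natAbs ∣ r.natAbs * w.natAbs := by
    rw [← Int.natAbs_mul]; exact Int.natAbs_dvd_natAbs.mpr h3
  have hd : d.natAbs ∣ Nat.gcd (Nat.gcd (p.natAbs * w.natAbs) (q.natAbs * w.natAbs))
      (r.natAbs * w.natAbs) := Nat.dvd_gcd (Nat.dvd_gcd d1 d2) d3
  rwa [Nat.gcd_mul_right, Nat.gcd_mul_right, hprim, one_mul] at hd

-- proportional pair whose components agree up to sign: the two signs are consistent
theorem pv_pair_sign (a b a' b' : Int) (e : a * b' = b * a')
    (ha : a' = a ∨ a' = -a) (hb : b' = b ∨ b' = -b) :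
    (a' = a ∧ b' = b) ∨ (a' = -a ∧ b' = -b) := by
  rcases ha with ha | ha <;> rcases hb with hb | hb
  · exact Or.inl ⟨ha, hb⟩
  · have h2 : 2 * (a * b) = 0 := by linear_combination a * hb - e - b * ha
    have hab : a * b = 0 := by linarith
    rcases mul_eq_zero.mp hab with h | h <;> omega
  · have h2 : 2 * (a * b) = 0 := by linear_combination e - a * hb + b * ha
    have hab : a * b = 0 := by linarith
    rcases mul_eq_zero.mp hab with h | h <;> omega
  · exact Or.inr ⟨ha, hb⟩

-- two primitive triples with zero cross product are equal up to a global sign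
theorem pv_primitive_parallel (p q r p' q' r' : Int)
    (hprim : Nat.gcd (Nat.gcd p.natAbs q.natAbs) r.natAbs = 1)
    (hprim' : Nat.gcd (Nat.gcd p'.natAbs q'.natAbs) r'.natAbs = 1)
    (e1 : q * r' = r * q') (e2 : r * p' = p * r') (e3 : p * q' = q * p') :
    (p' = p ∧ q' = q ∧ r' = r) ∨ (p' = -p ∧ q' = -q ∧ r' = -r) := by
  have hnp : p.natAbs = p'.natAbs :=
    Nat.dvd_antisymm
      (pv_dvd_abs p q r p p' hprim (dvd_mul_right p p') ⟨q', e3.symm⟩ ⟨r', e2⟩)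
      (pv_dvd_abs p' q' r' p' p hprim' (dvd_mul_right p' p)
        ⟨q, by linear_combination e3⟩ ⟨r, by linear_combination -e2⟩)
  have hnq : q.natAbs = q'.natAbs :=
    Nat.dvd_antisymm
      (pv_dvd_abs p q r q q' hprim ⟨p', e3⟩ (dvd_mul_right q q') ⟨r', e1.symm⟩)
      (pv_dvd_abs p' q' r' q' q hprim' ⟨p, by linear_combination -e3⟩
        (dvd_mul_right q' q) ⟨r, by linear_combination e1⟩)
  have hnr : r.natAbs = r'.natAbs :=
    Nat.dvd_antisymm
      (pv_dvd_abs p q r r r' hprim ⟨p', e2.symm⟩ ⟨q', e1⟩ (dvd_mul_right r r'))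
      (pv_dvd_abs p' q' r' r' r hprim' ⟨p, by linear_combination e2⟩
        ⟨q, by linear_combination -e1⟩ (dvd_mul_right r' r))
  have hp : p' = p ∨ p' = -p := Int.natAbs_eq_natAbs_iff.mp hnp.symm
  have hq : q' = q ∨ q' = -q := Int.natAbs_eq_natAbs_iff.mp hnq.symm
  have hr : r' = r ∨ r' = -r := Int.natAbs_eq_natAbs_iff.mp hnr.symm
  have S12 := pv_pair_sign p q p' q' e3 hp hq
  have S13 := pv_pair_sign p r p' r' e2.symm hp hr
  have S23 := pv_pair_sign q r q' r' e1 hq hr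
  rcases S12 with ⟨u1, u2⟩ | ⟨u1, u2⟩ <;> rcases S13 with ⟨v1, v2⟩ | ⟨v1, v2⟩ <;>
    rcases S23 with ⟨w1, w2⟩ | ⟨w1, w2⟩ <;> omega

-- (2) key lemma: for two filtered candidates, zero cross product ↔ equal canonical key
theorem pv_key (s t : Int × Int × Int) (hs : pvOk s) (ht : pvOk t) :
    pvCrossZero (pvToL s) (pvToL t) = true ↔ pvCanonT s = pvCanonT t := by
  obtain ⟨a, b, c⟩ := s
  obtain ⟨x, y, z⟩ := t
  obtain ⟨g, p, q, r, hg, ha, hb, hc, hprim, hcanon⟩ := pvCanon_spec a b c hs.1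
  obtain ⟨g', p', q', r', hg', hx, hy, hz, hprim', hcanon'⟩ := pvCanon_spec x y z ht.1
  have hgg : g * g' ≠ 0 := by positivity
  have cross_iff : pvCrossZero (pvToL (a, b, c)) (pvToL (x, y, z)) = true ↔
      (q * r' = r * q' ∧ r * p' = p * r' ∧ p * q' = q * p') := by
    simp only [pvToL, pvCrossZero, Bool.and_eq_true, beq_iff_eq]
    subst ha hb hc hx hy hz
    constructor
    · rintro ⟨⟨h1, h2⟩, h3⟩
      refine ⟨mul_left_cancel₀ hgg ?_, mul_left_cancel₀ hgg ?_, mul_left_cancel₀ hgg ?_⟩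
      · linear_combination h1
      · linear_combination h2
      · linear_combination h3
    · rintro ⟨h1, h2, h3⟩
      refine ⟨⟨?_, ?_⟩, ?_⟩
      · linear_combination g * g' * h1
      · linear_combination g * g' * h2
      · linear_combination g * g' * h3
  rw [cross_iff, show pvCanonT (a, b, c) = pvFlip (p, q, r) from hcanon,
    show pvCanonT (x, y, z) = pvFlip (p', q', r') from hcanon']
  have hnz : ¬(p = 0 ∧ q = 0 ∧ r = 0) := by
    rintro ⟨z1, z2, z3⟩
    rw [z1, z2, z3] at hprim
    simp at hprim
  constructor
  · rintro ⟨e1, e2, e3⟩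
    rcases pv_primitive_parallel p q r p' q' r' hprim hprim' e1 e2 e3 with
      ⟨h1, h2, h3⟩ | ⟨h1, h2, h3⟩
    · rw [h1, h2, h3]
    · rw [h1, h2, h3]
      exact (pvFlip_neg (p, q, r) hnz).symm
  · intro h
    obtain ⟨ε, hε, hfu⟩ := pvFlip_sign (p, q, r)
    obtain ⟨ε', hε', hfu'⟩ := pvFlip_sign (p', q', r')
    simp only [hfu, hfu', Prod.mk.injEq] at h
    obtain ⟨h1, h2, h3⟩ := h
    have hε2 : ε' * ε' = 1 := by rcases hε' with h | h <;> rw [h] <;> norm_num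
    have hp' : p' = (ε' * ε) * p := by
      calc p' = (ε' * ε') * p' := by rw [hε2, one_mul]
        _ = ε' * (ε' * p') := by ring
        _ = ε' * (ε * p) := by rw [h1]
        _ = (ε' * ε) * p := by ring
    have hq' : q' = (ε' * ε) * q := by
      calc q' = (ε' * ε') * q' := by rw [hε2, one_mul]
        _ = ε' * (ε' * q') := by ring
        _ = ε' * (ε * q) := by rw [h2]
        _ = (ε' * ε) * q := by ring
    have hr' : r' = (ε' * ε) * r := by
      calc r' = (ε' * ε') * r' := by rw [hε2, one_mul]
        _ = ε' * (ε' * r') := by ring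
        _ = ε' * (ε * r) := by rw [h3]
        _ = (ε' * ε) * r := by ring
    exact ⟨by rw [hq', hr']; ring, by rw [hr', hp']; ring, by rw [hp', hq']; ring⟩

-- loop bodies of the two ports, as standalone step functions over one candidate triple
def pvStepA (acc : List (List Int)) (t : Int × Int × Int) : List (List Int) :=
  if 1 ≤ PySem.List.count [t.1, t.2.1, t.2.2] (0 : Int) ∧
      PySem.List.count [t.1, t.2.1, t.2.2] (0 : Int) ≤ 2 then
    if acc.any (fun w => pvCrossZero w [t.1, t.2.1, t.2.2]) then acc
    else acc ++ [[t.1, t.2.1, t.2.2]]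
  else acc

def pvStepB (st : PySem.Set (Int × Int × Int) × List (List Int)) (t : Int × Int × Int) :
    PySem.Set (Int × Int × Int) × List (List Int) :=
  let zeros : Int := (if t.1 == 0 then 1 else 0) + (if t.2.1 == 0 then 1 else 0)
    + (if t.2.2 == 0 then 1 else 0)
  if zeros == 0 || zeros == 3 then st
  else
    let k := pvCanon t.1 t.2.1 t.2.2
    if k ∈ st.1 then st
    else (PySem.Set.add st.1 k, st.2 ++ [[t.1, t.2.1, t.2.2]])

-- the flattened candidate enumeration shared by both loops
def pvCands (n : Int) : List (Int × Int × Int) :=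
  (PySem.List.pyRange 0 (n + 1) 1).flatMap (fun x =>
    (pvAltRange n).flatMap (fun y => (pvAltRange n).map (fun z => (x, y, z))))

theorem portA_eq (n : Int) :
    generate_proposed_eigenvectors n = (pvCands n).foldl pvStepA [] := by
  unfold generate_proposed_eigenvectors pvCands
  simp only [List.foldl_flatMap, List.foldl_map]
  rfl

theorem portB_eq (n : Int) :
    generate_proposed_eigenvectors_alt n =
      ((pvCands n).foldl pvStepB ((PySem.Set.empty : PySem.Set (Int × Int × Int)), [])).2 := by
  unfold generate_proposed_eigenvectors_alt pvCands
  simp only [List.foldl_flatMap, List.foldl_map]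
  rfl

-- both filters coincide with pvOk
theorem pvStepA_eq (acc : List (List Int)) (t : Int × Int × Int) :
    pvStepA acc t = if pvOk t then
      (if acc.any (fun w => pvCrossZero w (pvToL t)) then acc else acc ++ [pvToL t])
    else acc := by
  obtain ⟨x, y, z⟩ := t
  refine if_congr ?_ rfl rfl
  unfold pvOk
  rcases eq_or_ne x 0 with hx | hx <;> rcases eq_or_ne y 0 with hy | hy <;>
    rcases eq_or_ne z 0 with hz | hz <;>
    simp [PySem.List.count, hx, hy, hz]

theorem pvStepB_eq (st : PySem.Set (Int × Int × Int) × List (List Int)) (t : Int × Int × Int) :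
    pvStepB st t = if pvOk t then
      (if pvCanonT t ∈ st.1 then st
       else (PySem.Set.add st.1 (pvCanonT t), st.2 ++ [pvToL t]))
    else st := by
  obtain ⟨x, y, z⟩ := t
  unfold pvStepB pvOk pvCanonT pvToL
  rcases eq_or_ne x 0 with hx | hx <;> rcases eq_or_ne y 0 with hy | hy <;>
    rcases eq_or_ne z 0 with hz | hz <;>
    simp [hx, hy, hz]

-- the loop invariant: A's list is the triples kept so far; B's set is their canonical keys
theorem pv_inv (cs : List (Int × Int × Int)) : ∀ (tri : List (Int × Int × Int)),
    (∀ t ∈ tri, pvOk t) →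
    cs.foldl pvStepA (tri.map pvToL) =
      (cs.foldl pvStepB (tri.map pvCanonT, tri.map pvToL)).2 := by
  induction cs with
  | nil => intro tri _; rfl
  | cons t cs ih =>
    intro tri htri
    simp only [List.foldl_cons]
    rw [pvStepA_eq, pvStepB_eq]
    by_cases hok : pvOk t
    · rw [if_pos hok, if_pos hok]
      have hiff : (tri.map pvToL).any (fun w => pvCrossZero w (pvToL t)) = true ↔
          pvCanonT t ∈ tri.map pvCanonT := by
        rw [List.any_eq_true]
        constructor
        · rintro ⟨w, hw, hcw⟩
          obtain ⟨s, hs, rfl⟩ := List.mem_map.mp hw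
          exact List.mem_map.mpr ⟨s, hs, (pv_key s t (htri s hs) hok).mp hcw⟩
        · intro hk
          obtain ⟨s, hs, hcs⟩ := List.mem_map.mp hk
          exact ⟨pvToL s, List.mem_map_of_mem hs, (pv_key s t (htri s hs) hok).mpr hcs⟩
      cases hA : (tri.map pvToL).any (fun w => pvCrossZero w (pvToL t)) with
      | true =>
        rw [if_pos (hiff.mp hA), if_pos rfl]
        exact ih tri htri
      | false =>
        have hk : pvCanonT t ∉ tri.map pvCanonT := by
          intro h
          rw [hiff.mpr h] at hA
          cases hA
        rw [if_neg hk, if_neg (by simp)]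
        have e1 : tri.map pvToL ++ [pvToL t] = (tri ++ [t]).map pvToL := by
          simp
        have e2 : PySem.Set.add (tri.map pvCanonT) (pvCanonT t) = (tri ++ [t]).map pvCanonT := by
          rw [PySem.Set.add_of_not_mem hk]
          simp
        rw [e1, e2]
        exact ih (tri ++ [t]) (by
          intro s hs
          rcases List.mem_append.mp hs with h | h
          · exact htri s h
          · rw [List.mem_singleton.mp h]; exact hok)
    · rw [if_neg hok, if_neg hok]
      exact ih tri htri

-- (3) the main equivalence
theorem pv_main (n : Int) :
    generate_proposed_eigenvectors n = generate_proposed_eigenvectors_alt n := by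
  rw [portA_eq, portB_eq]
  exact pv_inv (pvCands n) [] (by intro t h; cases h)

-- ===== VERDICT (by name: the statement is the Claim_ definition above) =====
theorem generate_proposed_eigenvectors_spec : Claim_equal_generate_proposed_eigenvectors := by
  intro n _
  unfold Spec_generate_proposed_eigenvectors
  exact pv_main n
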